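-- pv_equiv track=rewrite | github.com/MiniaczQ/file-sync | src/handle_mode.py | _mode2str
-- ===== SOURCE A (Python) =====
-- def _mode2str(mode):
--     """
--     Turns binary mode representation into string.
--     """
--     s = ""
--     for y in "rwxrwxrwx":
--         if mode & 0b100000000 == 0b100000000:
--             s += y
--         else:
--             s += "-"
--         mode = mode << 1
--     return s
-- ===== SOURCE B (Python) =====
-- _TABLE = ['---', '--x', '-w-', '-wx', 'r--', 'r-x', 'rw-', 'rwx']
--
--
-- def _mode2str(mode):
--     """
--     Turns binary mode representation into string.
--     """
--     return _TABLE[(mode >> 6) & 7] + _TABLE[(mode >> 3) & 7] + _TABLE[mode & 7]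
-- ===== Notes on version B (the rewrite author's own statement) =====
-- stated objective: idiomatic
-- what changed: Replaces the nine-iteration shift-and-test loop that appends one character at a time by three indexed lookups of the three octal permission digits (owner, group, other) in a static eight-entry rwx table.
import Mathlib
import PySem

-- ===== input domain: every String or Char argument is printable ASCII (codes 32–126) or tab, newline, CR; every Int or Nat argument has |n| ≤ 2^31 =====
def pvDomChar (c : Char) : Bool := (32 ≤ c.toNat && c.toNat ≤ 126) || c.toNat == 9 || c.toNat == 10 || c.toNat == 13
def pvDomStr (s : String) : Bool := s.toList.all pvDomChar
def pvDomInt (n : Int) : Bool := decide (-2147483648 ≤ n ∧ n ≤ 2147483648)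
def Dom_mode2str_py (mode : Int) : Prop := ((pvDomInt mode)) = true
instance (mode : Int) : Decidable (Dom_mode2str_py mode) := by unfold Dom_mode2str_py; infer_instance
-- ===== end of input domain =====

-- B replaces A's 9-step shift-and-test loop by three lookups of the octal digits in a static rwx table (idiomatic; same cost).

-- ===== PORT A =====
-- the loop 'for y in "rwxrwxrwx": if mode & 256 == 256: s += y else: s += "-"; mode <<= 1'
def mode2strGo : List Char → Int → String → String
  | [], _, s => s
  | y :: ys, mode, s =>
      mode2strGo ys (mode <<< (1 : Nat))
        (if Int.land mode 256 == 256 then s.push y else s.push '-')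

def mode2str_py (mode : Int) : String :=
  mode2strGo "rwxrwxrwx".toList mode ""

-- ===== PORT B =====
def rwxTable : List String := ["---", "--x", "-w-", "-wx", "r--", "r-x", "rw-", "rwx"]

def mode2str_py_alt (mode : Int) : String :=
  rwxTable.getD (Int.land (mode >>> (6 : Nat)) 7).toNat ""
    ++ rwxTable.getD (Int.land (mode >>> (3 : Nat)) 7).toNat ""
    ++ rwxTable.getD (Int.land mode 7).toNat ""

-- ===== PRECONDITION & SPEC =====
def Spec_mode2str_py (mode : Int) (out : String) : Prop := out = mode2str_py_alt mode
instance (mode : Int) (out : String) : Decidable (Spec_mode2str_py mode out) := by unfold Spec_mode2str_py; infer_instance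

-- ===== CLAIM (what is proved, stated in full; the proofs are below) =====
def Claim_equal_mode2str_py : Prop := ∀ (mode : Int), Dom_mode2str_py mode → Spec_mode2str_py mode (mode2str_py mode)

-- ===== LEMMAS AND PROOFS =====

-- Bits of 7 = 0b111: Nat.ldiff 7 m (two's-complement AND of ¬m with 7) is 7 - m % 8.
theorem nat_ldiff7 (m : Nat) : Nat.ldiff 7 m = 7 - m % 8 := by
  apply Nat.eq_of_testBit_eq
  intro i
  rw [Nat.testBit_ldiff]
  match i with
  | 0 =>
    simp only [Nat.testBit_eq_decide_div_mod_eq, pow_zero, Nat.div_one]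
    by_cases h : m % 2 = 1 <;> simp [h] <;> omega
  | 1 =>
    simp only [Nat.testBit_eq_decide_div_mod_eq, pow_one]
    by_cases h : m / 2 % 2 = 1 <;> simp [h] <;> omega
  | 2 =>
    simp only [Nat.testBit_eq_decide_div_mod_eq]
    norm_num
    by_cases h : m / 4 % 2 = 1 <;> simp [h] <;> omega
  | (i+3) =>
    have h8 : (8:Nat) ≤ 2 ^ (i+3) := by
      calc (8:Nat) = 2^3 := by norm_num
      _ ≤ 2^(i+3) := Nat.pow_le_pow_right (by norm_num) (by omega)
    rw [Nat.testBit_lt_two_pow (show 7 - m % 8 < 2 ^ (i+3) by omega),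
        show (7:Nat) = 2^3 - 1 from by norm_num, Nat.testBit_two_pow_sub_one]
    simp

-- Python's m & 7 equals m mod 8 (two's complement), for every integer m.
theorem int_land_seven (m : Int) : Int.land m 7 = m % 8 := by
  cases m with
  | ofNat n =>
    show Int.land (Int.ofNat n) (Int.ofNat 7) = _
    simp only [Int.land]
    rw [show (7:Nat) = 2^3 - 1 from by norm_num, Nat.and_two_pow_sub_one_eq_mod]
    simp only [Int.ofNat_eq_natCast]
    omega
  | negSucc n =>
    show Int.land (Int.negSucc n) (Int.ofNat 7) = _
    simp only [Int.land]
    rw [nat_ldiff7, Int.negSucc_eq]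
    have : n % 8 < 8 := Nat.mod_lt _ (by norm_num)
    omega

theorem nat_testBit_256 (j : Nat) (hj : j ≠ 8) : Nat.testBit 256 j = false := by
  rw [show (256:Nat) = 2^8 from by norm_num, Nat.testBit_two_pow]
  simp [Ne.symm hj]

theorem nat_and256 (n : Nat) : n &&& 256 = if n % 512 < 256 then 0 else 256 := by
  apply Nat.eq_of_testBit_eq
  intro i
  rw [Nat.testBit_and, show (256:Nat) = 2^8 from by norm_num, Nat.testBit_two_pow]
  by_cases hi : i = 8
  · subst hi
    by_cases hc : n % 512 < 256 <;>
      simp [hc, Nat.testBit_eq_decide_div_mod_eq] <;> omega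
  · split <;> simp [nat_testBit_256 i hi, Ne.symm hi]

theorem nat_ldiff256 (n : Nat) : Nat.ldiff 256 n = if 256 ≤ n % 512 then 0 else 256 := by
  apply Nat.eq_of_testBit_eq
  intro i
  rw [Nat.testBit_ldiff, show (256:Nat) = 2^8 from by norm_num, Nat.testBit_two_pow]
  by_cases hi : i = 8
  · subst hi
    by_cases hc : 256 ≤ n % 512 <;>
      simp [hc, Nat.testBit_eq_decide_div_mod_eq] <;> omega
  · split <;> simp [nat_testBit_256 i hi, Ne.symm hi]

-- Python's m & 256 tests bit 8 of m, i.e. whether m mod 512 ≥ 256.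
theorem int_land_256 (m : Int) : Int.land m 256 = if m % 512 < 256 then 0 else 256 := by
  cases m with
  | ofNat n =>
    show Int.land (Int.ofNat n) (Int.ofNat 256) = _
    simp only [Int.land]
    rw [nat_and256]
    have h1 : Int.ofNat n % 512 = (n % 512 : Nat) := by
      simp only [Int.ofNat_eq_natCast]
      omega
    rw [h1]
    split <;> split <;> first | rfl | omega
  | negSucc n =>
    show Int.land (Int.negSucc n) (Int.ofNat 256) = _
    simp only [Int.land]
    rw [nat_ldiff256]
    have h1 : Int.negSucc n % 512 = 511 - (n % 512 : Nat) := by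
      rw [Int.negSucc_eq]
      have : n % 512 < 512 := Nat.mod_lt _ (by norm_num)
      omega
    rw [h1]
    have : n % 512 < 512 := Nat.mod_lt _ (by norm_num)
    split <;> split <;> first | rfl | omega

-- A's loop only ever reads bits 0..8 of the remaining mode, so it factors through mod 512.
theorem mode2strGo_congr (ys : List Char) (m₁ m₂ : Int) (s : String)
    (h : m₁ % 512 = m₂ % 512) : mode2strGo ys m₁ s = mode2strGo ys m₂ s := by
  induction ys generalizing m₁ m₂ s with
  | nil => rfl
  | cons y ys ih =>
    have hc : (Int.land m₁ 256 == 256) = (Int.land m₂ 256 == 256) := by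
      rw [int_land_256, int_land_256, h]
    simp only [mode2strGo, hc]
    apply ih
    rw [Int.shiftLeft_eq, Int.shiftLeft_eq]
    norm_num
    omega

theorem mode2str_py_emod (m : Int) : mode2str_py m = mode2str_py (m % 512) := by
  unfold mode2str_py
  exact mode2strGo_congr _ _ _ _ (by omega)

theorem mode2str_py_alt_emod (m : Int) : mode2str_py_alt m = mode2str_py_alt (m % 512) := by
  unfold mode2str_py_alt
  rw [Int.shiftRight_eq_div_pow, Int.shiftRight_eq_div_pow,
      Int.shiftRight_eq_div_pow, Int.shiftRight_eq_div_pow,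
      int_land_seven, int_land_seven, int_land_seven,
      int_land_seven, int_land_seven, int_land_seven]
  norm_num
  have e1 : (m / 64 % 8).toNat = (m % 512 / 64 % 8).toNat := by omega
  have e2 : (m / 8 % 8).toNat = (m % 512 / 8 % 8).toNat := by omega
  rw [e1, e2]

set_option maxRecDepth 10000 in
theorem key : ∀ r : Fin 512, mode2str_py (r : Int) = mode2str_py_alt (r : Int) := by
  decide

-- ===== VERDICT (by name: the statement is the Claim_ definition above) =====
theorem mode2str_py_spec : Claim_equal_mode2str_py := by
  intro m _
  unfold Spec_mode2str_py
  have h0 : (0:Int) ≤ m % 512 := by omega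
  have h1 : m % 512 < 512 := by omega
  have hr : (m % 512) = ((⟨(m % 512).toNat, by omega⟩ : Fin 512) : Int) := by
    simp
    omega
  rw [mode2str_py_emod, mode2str_py_alt_emod, hr]
  exact key _
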